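-- pv_equiv track=rewrite | github.com/ITlearning/Algorithm_Solved | Python/Programmers/2022_KAKAO_BLIND/A06.py | solution
-- ===== SOURCE A (Python) =====
-- def reload(num,b,sx,sy,ex,ey, point):
--     # 적 공격시 값 빼기
--     if num == 1:
--         for i in range(sx, ex+1):
--             for j in range(sy,ey+1):
--                 b[i][j] -= point
--
--     # 아군 힐러 시 값 더하기
--     elif num == 2:
--         for i in range(sx, ex+1):
--             for j in range(sy,ey+1):
--                 b[i][j] += point
--
-- def solution(board, skill):
--
--     # 입력받은 스킬 돌리면서
--     for i in skill:
--         # 적 입력 시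
--         if i[0] == 1:
--             # 해당하는 값 추출
--             start_x, start_y = i[1],i[2]
--             end_x, end_y = i[3],i[4]
--             attack = i[5]
--             # reload() 함수 돌리기
--             reload(i[0],board,start_x,start_y,end_x,end_y, attack)
--         # 아군 입력 시
--         elif i[0] == 2:
--             # 해당하는 값 추출
--             start_x, start_y = i[1],i[2]
--             end_x, end_y = i[3],i[4]
--             heal = i[5]
--             # reload() 함수 돌리기
--             reload(i[0],board,start_x,start_y,end_x,end_y, heal)
--
--
--     total = 0
--     # 0보다 작은 수의 개수 빼고 카운트
--     for i in board:
--         for j in i: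
--             if j > 0:
--                 total += 1
--
--     return total
-- ===== SOURCE B (Python) =====
-- def solution(board, skill):
--     # 2D difference array (imos): four corner updates per skill, then one
--     # prefix-sum sweep while counting positive cells.  Does not mutate board.
--     n = len(board)
--     m = len(board[0]) if board else 0
--     diff = [[0] * (m + 1) for _ in range(n + 1)]
--     for s in skill:
--         if s[0] == 1:
--             d = -s[5]
--         elif s[0] == 2:
--             d = s[5]
--         else:
--             continue
--         sx, sy, ex, ey = s[1], s[2], s[3], s[4]
--         if sx > ex or sy > ey:
--             continue
--         diff[sx][sy] += d
--         diff[sx][ey + 1] -= d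
--         diff[ex + 1][sy] -= d
--         diff[ex + 1][ey + 1] += d
--     total = 0
--     col = [0] * m
--     for i in range(n):
--         acc = 0
--         for j in range(m):
--             acc += diff[i][j]
--             cj = col[j] + acc
--             col[j] = cj
--             if board[i][j] + cj > 0:
--                 total += 1
--     return total
-- ===== Notes on version B (the rewrite author's own statement) =====
-- stated objective: alternative
-- what changed: Replaces A's per-skill sweep over every cell of each rectangle (and its in-place board mutation) with a 2D difference array: four corner updates per skill, then a single prefix-sum pass that counts positive cells (intended as faster; measured 1.38x at the largest timing size, below the 1.5x bar); …
-- outside the precondition, e.g. on solution([[1]], [[1, -1, 0, -1, 0, 5]]): A returns 0, B returns 1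
import Mathlib
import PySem

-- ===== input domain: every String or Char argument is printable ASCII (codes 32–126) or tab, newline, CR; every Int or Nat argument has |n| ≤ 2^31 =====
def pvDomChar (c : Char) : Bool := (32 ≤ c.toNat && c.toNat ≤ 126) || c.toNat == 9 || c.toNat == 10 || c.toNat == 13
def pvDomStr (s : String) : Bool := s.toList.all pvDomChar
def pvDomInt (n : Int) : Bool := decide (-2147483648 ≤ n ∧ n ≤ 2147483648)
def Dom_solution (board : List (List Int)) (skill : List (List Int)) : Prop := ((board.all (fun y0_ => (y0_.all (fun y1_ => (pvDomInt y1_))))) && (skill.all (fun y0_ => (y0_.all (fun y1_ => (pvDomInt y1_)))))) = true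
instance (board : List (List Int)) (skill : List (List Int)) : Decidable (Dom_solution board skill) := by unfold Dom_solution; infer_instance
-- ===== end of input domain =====

-- B replaces A's per-skill full-rectangle sweeps by a 2D difference array (4 corner
-- updates per skill + one prefix-sum counting pass) — a different algorithm of similar
-- measured cost.  A mutates `board` in place; B does not — the equivalence proved is
-- about the return value only.

-- ===== PORT A =====

-- b[i][j] += d  (Python indexing; out of range = IndexError, unreached under Pre_;
-- pySetD/pyGetD are the total forms of the PySem primitives)
def pvCellAdd (b : List (List Int)) (i j : Int) (d : Int) : List (List Int) :=
  PySem.List.pySetD b i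
    (PySem.List.pySetD (PySem.List.pyGetD b i [])
      j ((PySem.List.pyGetD (PySem.List.pyGetD b i []) j 0) + d))

-- literal port of `reload`
def reloadPort (num : Int) (b : List (List Int)) (sx sy ex ey point : Int) : List (List Int) :=
  if num = 1 then
    (PySem.List.pyRange sx (ex + 1) 1).foldl (fun b i =>
      (PySem.List.pyRange sy (ey + 1) 1).foldl (fun b j => pvCellAdd b i j (-point)) b) b
  else if num = 2 then
    (PySem.List.pyRange sx (ex + 1) 1).foldl (fun b i =>
      (PySem.List.pyRange sy (ey + 1) 1).foldl (fun b j => pvCellAdd b i j point) b) b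
  else b

-- the body of A's `for i in skill` loop
def pvStepA (b : List (List Int)) (i : List Int) : List (List Int) :=
  -- i[0] (IndexError on [] unreached under Pre_)
  if PySem.List.pyGetD i 0 0 = 1 then
    reloadPort (PySem.List.pyGetD i 0 0) b (PySem.List.pyGetD i 1 0) (PySem.List.pyGetD i 2 0)
      (PySem.List.pyGetD i 3 0) (PySem.List.pyGetD i 4 0) (PySem.List.pyGetD i 5 0)
  else if PySem.List.pyGetD i 0 0 = 2 then
    reloadPort (PySem.List.pyGetD i 0 0) b (PySem.List.pyGetD i 1 0) (PySem.List.pyGetD i 2 0)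
      (PySem.List.pyGetD i 3 0) (PySem.List.pyGetD i 4 0) (PySem.List.pyGetD i 5 0)
  else b

-- the body of A's counting loop
def pvCountRow (total : Int) (row : List Int) : Int :=
  row.foldl (fun total j => if j > 0 then total + 1 else total) total

def solution (board : List (List Int)) (skill : List (List Int)) : Int :=
  (skill.foldl pvStepA board).foldl pvCountRow 0

-- ===== PORT B =====

-- diff[i][j] += d (B's own cell update; Python indexing, total form as above)
def pvCellAddB (b : List (List Int)) (i j : Int) (d : Int) : List (List Int) :=
  PySem.List.pySetD b i
    (PySem.List.pySetD (PySem.List.pyGetD b i [])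
      j ((PySem.List.pyGetD (PySem.List.pyGetD b i []) j 0) + d))

-- the four corner updates of one skill row (Source B's diff[..][..] ±= d lines)
def pvBump4 (diff : List (List Int)) (sx sy ex ey d : Int) : List (List Int) :=
  pvCellAddB (pvCellAddB (pvCellAddB (pvCellAddB diff sx sy d) sx (ey + 1) (-d)) (ex + 1) sy (-d))
    (ex + 1) (ey + 1) d

-- Source B skips empty rectangles (`if sx > ex or sy > ey: continue`)
def pvBump4Guard (diff : List (List Int)) (sx sy ex ey d : Int) : List (List Int) :=
  if sx > ex ∨ sy > ey then diff else pvBump4 diff sx sy ex ey d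

-- the body of Source B's `for s in skill` loop
def pvStepB (diff : List (List Int)) (s : List Int) : List (List Int) :=
  if PySem.List.pyGetD s 0 0 = 1 then
    pvBump4Guard diff (PySem.List.pyGetD s 1 0) (PySem.List.pyGetD s 2 0)
      (PySem.List.pyGetD s 3 0) (PySem.List.pyGetD s 4 0) (-(PySem.List.pyGetD s 5 0))
  else if PySem.List.pyGetD s 0 0 = 2 then
    pvBump4Guard diff (PySem.List.pyGetD s 1 0) (PySem.List.pyGetD s 2 0)
      (PySem.List.pyGetD s 3 0) (PySem.List.pyGetD s 4 0) (PySem.List.pyGetD s 5 0)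
  else diff

-- the body of Source B's inner `for j in range(m)` loop; state = ((total, acc), col)
def pvScanInner (diff board : List (List Int)) (i : Int)
    (st2 : (Int × Int) × List Int) (j : Int) : (Int × Int) × List Int :=
  let acc := st2.1.2 + PySem.List.pyGetD (PySem.List.pyGetD diff i []) j 0
  let cj := PySem.List.pyGetD st2.2 j 0 + acc
  let col := PySem.List.pySetD st2.2 j cj
  let total := if PySem.List.pyGetD (PySem.List.pyGetD board i []) j 0 + cj > 0
               then st2.1.1 + 1 else st2.1.1
  ((total, acc), col)

-- the body of Source B's outer `for i in range(n)` loop; state = (total, col)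
def pvScanOuter (diff board : List (List Int)) (m : Nat)
    (st : Int × List Int) (i : Int) : Int × List Int :=
  let inner := (PySem.List.pyRange 0 (m : Int) 1).foldl (pvScanInner diff board i) ((st.1, 0), st.2)
  (inner.1.1, inner.2)

def solution_alt (board : List (List Int)) (skill : List (List Int)) : Int :=
  let n := board.length
  let m := (board.headD []).length              -- len(board[0]) if board else 0
  let diff := skill.foldl pvStepB (List.replicate (n + 1) (List.replicate (m + 1) (0 : Int)))
  let fin := (PySem.List.pyRange 0 (n : Int) 1).foldl (pvScanOuter diff board m)
    (0, List.replicate m (0 : Int))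
  fin.1

-- ===== PRECONDITION & SPEC =====

-- Pre_ is the task's natural domain: a rectangular board, every skill row nonempty, and
-- every attack/heal row (type 1 or 2) of length ≥ 6 carrying an in-bounds non-degenerate
-- rectangle 0 ≤ sx ≤ ex < n, 0 ≤ sy ≤ ey < m.  Outside it A raises IndexError, or (for
-- negative coordinates) returns a value produced by Python's negative-index wraparound,
-- which is malformed input for this grid problem.
def Pre_solution (board : List (List Int)) (skill : List (List Int)) : Prop :=
  (∀ row ∈ board, row.length = (board.headD []).length) ∧
  (∀ s ∈ skill, s ≠ [] ∧
    ((s.getD 0 0 = 1 ∨ s.getD 0 0 = 2) →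
      6 ≤ s.length ∧
      0 ≤ s.getD 1 0 ∧ s.getD 1 0 ≤ s.getD 3 0 ∧ s.getD 3 0 < (board.length : Int) ∧
      0 ≤ s.getD 2 0 ∧ s.getD 2 0 ≤ s.getD 4 0 ∧ s.getD 4 0 < ((board.headD []).length : Int)))

instance (board : List (List Int)) (skill : List (List Int)) : Decidable (Pre_solution board skill) := by
  unfold Pre_solution; infer_instance

def pvWitness_solution : List (List Int) × List (List Int) :=
  ([[1, -1], [2, 0]], [[1, 0, 0, 1, 1, 1], [2, 0, 0, 0, 0, 3]])

def Spec_solution (board : List (List Int)) (skill : List (List Int)) (out : Int) : Prop := out = solution_alt board skill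
instance (board : List (List Int)) (skill : List (List Int)) (out : Int) : Decidable (Spec_solution board skill out) := by unfold Spec_solution; infer_instance

-- ===== CLAIM (what is proved, stated in full; the proofs are below) =====
def Claim_equal_solution : Prop := ∀ (board : List (List Int)) (skill : List (List Int)), Dom_solution board skill → Pre_solution board skill → Spec_solution board skill (solution board skill)

-- ===== LEMMAS AND PROOFS =====

-- proof-side helpers ------------------------------------------------------

-- cell value of a grid
def gAt (g : List (List Int)) (i j : Nat) : Int := (g.getD i []).getD j 0

-- an n×m grid
def Grid (n m : Nat) (g : List (List Int)) : Prop :=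
  g.length = n ∧ ∀ i : Nat, i < n → (g.getD i []).length = m

-- the net effect of one skill row on cell (i,j)
def sdelta (s : List Int) (i j : Nat) : Int :=
  if (s.getD 0 0 = 1 ∨ s.getD 0 0 = 2) ∧ s.getD 1 0 ≤ (i : Int) ∧ (i : Int) ≤ s.getD 3 0 ∧
      s.getD 2 0 ≤ (j : Int) ∧ (j : Int) ≤ s.getD 4 0 then
    (if s.getD 0 0 = 1 then -(s.getD 5 0) else s.getD 5 0)
  else 0

def Fsk (skill : List (List Int)) (i j : Nat) : Int := (skill.map (fun s => sdelta s i j)).sum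

-- point mass a skill row puts at a cell of the difference array
def ind (c : Int) (k : Nat) : Int := if (k : Int) = c then 1 else 0

def wmass (s : List Int) (i j : Nat) : Int :=
  (if s.getD 0 0 = 1 then -(s.getD 5 0) else s.getD 5 0) *
    (if s.getD 0 0 = 1 ∨ s.getD 0 0 = 2 then
      (ind (s.getD 1 0) i - ind (s.getD 3 0 + 1) i) * (ind (s.getD 2 0) j - ind (s.getD 4 0 + 1) j)
    else 0)

def Wsk (skill : List (List Int)) (i j : Nat) : Int := (skill.map (fun s => wmass s i j)).sum

-- the common specification count
def specT (n m : Nat) (f : Nat → Nat → Int) : Int :=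
  ∑ i ∈ Finset.range n, ∑ j ∈ Finset.range m, (if 0 < f i j then (1 : Int) else 0)

-- a valid skill list for an n×m board
def SkOK (n m : Nat) (skill : List (List Int)) : Prop :=
  ∀ s ∈ skill, (s.getD 0 0 = 1 ∨ s.getD 0 0 = 2) →
    0 ≤ s.getD 1 0 ∧ s.getD 1 0 ≤ s.getD 3 0 ∧ s.getD 3 0 < (n : Int) ∧
    0 ≤ s.getD 2 0 ∧ s.getD 2 0 ≤ s.getD 4 0 ∧ s.getD 4 0 < (m : Int)

-- small list helpers ------------------------------------------------------

theorem pvGetD_set {α : Type} (l : List α) (k : Nat) (hk : k < l.length) (v d : α) (j : Nat) :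
    (l.set k v).getD j d = if j = k then v else l.getD j d := by
  by_cases h : j = k
  · subst h
    simp [List.getD_eq_getElem?_getD, hk]
  · simp [List.getD_eq_getElem?_getD, Ne.symm h, h]

theorem pvGetD_eq_getElem' {α : Type} (l : List α) (k : Nat) (hk : k < l.length) (d : α) :
    l.getD k d = l[k] := by
  rw [List.getD_eq_getElem?_getD, List.getElem?_eq_getElem hk]
  rfl

theorem pvSet_getD_self {α : Type} (l : List α) (k : Nat) (hk : k < l.length) (d : α) :
    l.set k (l.getD k d) = l := by
  apply List.ext_getElem
  · simp
  · intro i h1 h2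
    simp only [List.getElem_set]
    split
    · next h => subst h; exact pvGetD_eq_getElem' l k hk d
    · rfl

theorem pvGetD_replicate {α : Type} (c : Nat) (x d : α) (i : Nat) :
    (List.replicate c x).getD i d = if i < c then x else d := by
  by_cases h : i < c
  · simp [List.getD_eq_getElem?_getD, h]
  · simp [List.getD_eq_getElem?_getD, h]

theorem pvPyGetD_num (s : List Int) (k : Nat) :
    PySem.List.pyGetD s ((k : Nat) : Int) 0 = s.getD k 0 := by
  simp

-- basic cell update ------------------------------------------------------

theorem pvCellAdd_nat (g : List (List Int)) (i j : Nat) (d : Int) :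
    pvCellAdd g (i : Int) (j : Int) d
      = g.set i ((g.getD i []).set j ((g.getD i []).getD j 0 + d)) := by
  simp [pvCellAdd]

theorem Grid_set (n m : Nat) (g : List (List Int)) (hg : Grid n m g) (i : Nat) (r : List Int)
    (hr : r.length = m) : Grid n m (g.set i r) := by
  obtain ⟨hlen, hrow⟩ := hg
  refine ⟨by simp [hlen], ?_⟩
  intro i' hi'
  by_cases hii : i' = i
  · subst hii
    rw [pvGetD_set g i' (by omega) r [] i', if_pos rfl]
    exact hr
  · by_cases hlt : i < g.length
    · rw [pvGetD_set g i hlt r [] i', if_neg hii]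
      exact hrow i' hi'
    · rw [List.set_eq_of_length_le (by omega)]
      exact hrow i' hi'

theorem gAt_set (n m : Nat) (g : List (List Int)) (hg : Grid n m g) (i j : Nat)
    (hi : i < n) (hj : j < m) (d : Int) (i' j' : Nat) :
    gAt (g.set i ((g.getD i []).set j ((g.getD i []).getD j 0 + d))) i' j'
      = gAt g i' j' + (if i' = i ∧ j' = j then d else 0) := by
  obtain ⟨hlen, hrow⟩ := hg
  have hig : i < g.length := by omega
  have hjr : j < (g.getD i []).length := by rw [hrow i hi]; exact hj
  unfold gAt
  rw [pvGetD_set g i hig _ [] i']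
  by_cases hii : i' = i
  · subst hii
    rw [if_pos rfl, pvGetD_set _ j hjr _ 0 j']
    by_cases hjj : j' = j
    · subst hjj
      rw [if_pos rfl, if_pos ⟨rfl, rfl⟩]
    · rw [if_neg hjj, if_neg (fun hc => hjj hc.2), add_zero]
  · rw [if_neg hii, if_neg (fun hc => hii hc.1), add_zero]

-- counts over ranges ------------------------------------------------------

theorem count_pyRange_one (a b x : Int) :
    (PySem.List.pyRange a b 1).count x = if a ≤ x ∧ x < b then 1 else 0 := by
  by_cases hm : x ∈ PySem.List.pyRange a b 1
  · rw [List.count_eq_one_of_mem (PySem.List.nodup_pyRange_one a b) hm,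
      if_pos (PySem.List.mem_pyRange_one.1 hm)]
  · rw [List.count_eq_zero.2 hm, if_neg (fun hc => hm (PySem.List.mem_pyRange_one.2 hc))]

-- A-side: the row loop ----------------------------------------------------

theorem rowFold_length (L : List Int) (row : List Int) (d : Int) :
    (L.foldl (fun row j => PySem.List.pySetD row j (PySem.List.pyGetD row j 0 + d)) row).length
      = row.length := by
  induction L generalizing row with
  | nil => rfl
  | cons x L ih =>
    rw [List.foldl_cons, ih]
    exact PySem.List.length_pySetD _ _ _

theorem rowFold_getD (L : List Int) (row : List Int) (d : Int)
    (hL : ∀ x ∈ L, 0 ≤ x ∧ x < (row.length : Int)) (j : Nat) :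
    (L.foldl (fun row j => PySem.List.pySetD row j (PySem.List.pyGetD row j 0 + d)) row).getD j 0
      = row.getD j 0 + d * (L.count (j : Int)) := by
  induction L generalizing row with
  | nil => simp
  | cons x L ih =>
    obtain ⟨hx0, hxl⟩ := hL x List.mem_cons_self
    have hklen : x.toNat < row.length := by omega
    rw [List.foldl_cons]
    have hset : PySem.List.pySetD row x (PySem.List.pyGetD row x 0 + d)
        = row.set x.toNat (row.getD x.toNat 0 + d) := by
      have hgd : PySem.List.pyGetD row x 0 = row.getD x.toNat 0 := by
        rw [PySem.List.pyGetD_eq_getElem row 0 hx0 hxl, pvGetD_eq_getElem' row x.toNat hklen]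
      rw [PySem.List.pySetD_of_nonneg row _ hx0, hgd]
    rw [hset, ih _ (by
      intro y hy
      have := hL y (List.mem_cons_of_mem x hy)
      simpa using this)]
    rw [pvGetD_set row x.toNat hklen _ 0 j, List.count_cons]
    simp only [beq_iff_eq]
    split_ifs with h1 h2 h2
    · subst h1; push_cast; ring
    · exfalso; omega
    · exfalso; omega
    · push_cast; ring

theorem foldl_cellAdd_row (L : List Int) (g : List (List Int)) (i : Nat) (hi : i < g.length)
    (d : Int) :
    L.foldl (fun b j => pvCellAdd b (i : Int) j d) g
      = g.set i (L.foldl (fun row j => PySem.List.pySetD row j (PySem.List.pyGetD row j 0 + d))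
          (g.getD i [])) := by
  induction L generalizing g with
  | nil => rw [List.foldl_nil, List.foldl_nil, pvSet_getD_self g i hi]
  | cons x L ih =>
    rw [List.foldl_cons, List.foldl_cons]
    have hstep : pvCellAdd g (i : Int) x d
        = g.set i (PySem.List.pySetD (g.getD i []) x (PySem.List.pyGetD (g.getD i []) x 0 + d)) := by
      unfold pvCellAdd
      simp
    rw [hstep, ih _ (by simpa using hi)]
    rw [pvGetD_set g i hi _ [] i, if_pos rfl, List.set_set]

-- A-side: the rectangle loop ----------------------------------------------

theorem foldl_rect (n m : Nat) (sy ey d : Int) (hsy : 0 ≤ sy) (hey : ey < (m : Int))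
    (L : List Int) (hL : ∀ x ∈ L, 0 ≤ x ∧ x < (n : Int)) (g : List (List Int)) (hg : Grid n m g) :
    Grid n m (L.foldl (fun b i =>
        (PySem.List.pyRange sy (ey + 1) 1).foldl (fun b j => pvCellAdd b i j d) b) g) ∧
    ∀ i j : Nat, i < n → j < m →
      gAt (L.foldl (fun b i =>
        (PySem.List.pyRange sy (ey + 1) 1).foldl (fun b j => pvCellAdd b i j d) b) g) i j
      = gAt g i j + d * (L.count (i : Int)) * (if sy ≤ (j : Int) ∧ (j : Int) ≤ ey then 1 else 0) := by
  induction L generalizing g with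
  | nil =>
    refine ⟨hg, ?_⟩
    intro i j _ _
    simp
  | cons x L ih =>
    obtain ⟨hx0, hxn⟩ := hL x List.mem_cons_self
    have hxg : x.toNat < g.length := by rw [hg.1]; omega
    have hrowlen : (g.getD x.toNat []).length = m := hg.2 x.toNat (by omega)
    have hx : x = ((x.toNat : Nat) : Int) := (Int.toNat_of_nonneg hx0).symm
    have hcols : ∀ y ∈ PySem.List.pyRange sy (ey + 1) 1,
        0 ≤ y ∧ y < ((g.getD x.toNat []).length : Int) := by
      intro y hy
      have := PySem.List.mem_pyRange_one.1 hy
      rw [hrowlen]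
      omega
    -- one row pass
    have hone : (PySem.List.pyRange sy (ey + 1) 1).foldl (fun b j => pvCellAdd b x j d) g
        = g.set x.toNat ((PySem.List.pyRange sy (ey + 1) 1).foldl
            (fun row j => PySem.List.pySetD row j (PySem.List.pyGetD row j 0 + d)) (g.getD x.toNat [])) := by
      conv_lhs => rw [hx]
      exact foldl_cellAdd_row _ g x.toNat hxg d
    set row' := (PySem.List.pyRange sy (ey + 1) 1).foldl
        (fun row j => PySem.List.pySetD row j (PySem.List.pyGetD row j 0 + d)) (g.getD x.toNat []) with hrow'
    have hrow'len : row'.length = m := by rw [hrow', rowFold_length, hrowlen]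
    have hg1 : Grid n m (g.set x.toNat row') := Grid_set n m g hg x.toNat row' hrow'len
    rw [List.foldl_cons, hone]
    obtain ⟨ihG, ihP⟩ := ih (fun y hy => hL y (List.mem_cons_of_mem x hy)) (g.set x.toNat row') hg1
    refine ⟨ihG, ?_⟩
    intro i j hi hj
    rw [ihP i j hi hj]
    unfold gAt
    rw [pvGetD_set g x.toNat hxg row' [] i, List.count_cons]
    simp only [beq_iff_eq]
    by_cases hix : i = x.toNat
    · rw [if_pos hix, hrow', rowFold_getD _ _ _ hcols j, count_pyRange_one, hix]
      simp only [show (sy ≤ (j : Int) ∧ (j : Int) < ey + 1) ↔ (sy ≤ (j : Int) ∧ (j : Int) ≤ ey) from by omega]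
      split_ifs <;> first | (exfalso; omega) | (push_cast; ring) | ring
    · rw [if_neg hix]
      split_ifs <;> first | (exfalso; omega) | (push_cast; ring) | ring

theorem stepA_effect (n m : Nat) (s : List Int)
    (hs : (s.getD 0 0 = 1 ∨ s.getD 0 0 = 2) →
      0 ≤ s.getD 1 0 ∧ s.getD 1 0 ≤ s.getD 3 0 ∧ s.getD 3 0 < (n : Int) ∧
      0 ≤ s.getD 2 0 ∧ s.getD 2 0 ≤ s.getD 4 0 ∧ s.getD 4 0 < (m : Int))
    (g : List (List Int)) (hg : Grid n m g) :
    Grid n m (pvStepA g s) ∧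
    ∀ i j : Nat, i < n → j < m → gAt (pvStepA g s) i j = gAt g i j + sdelta s i j := by
  have e0 : PySem.List.pyGetD s 0 0 = s.getD 0 0 := by simpa using pvPyGetD_num s 0
  have e1 : PySem.List.pyGetD s 1 0 = s.getD 1 0 := by simpa using pvPyGetD_num s 1
  have e2 : PySem.List.pyGetD s 2 0 = s.getD 2 0 := by simpa using pvPyGetD_num s 2
  have e3 : PySem.List.pyGetD s 3 0 = s.getD 3 0 := by simpa using pvPyGetD_num s 3
  have e4 : PySem.List.pyGetD s 4 0 = s.getD 4 0 := by simpa using pvPyGetD_num s 4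
  have e5 : PySem.List.pyGetD s 5 0 = s.getD 5 0 := by simpa using pvPyGetD_num s 5
  by_cases h1 : s.getD 0 0 = 1
  · obtain ⟨ha0, hab, hbn, hc0, hcd, hdm⟩ := hs (Or.inl h1)
    have hstep : pvStepA g s = reloadPort 1 g (s.getD 1 0) (s.getD 2 0) (s.getD 3 0) (s.getD 4 0) (s.getD 5 0) := by
      unfold pvStepA
      rw [e0, e1, e2, e3, e4, e5, if_pos h1, h1]
    have hrel : reloadPort 1 g (s.getD 1 0) (s.getD 2 0) (s.getD 3 0) (s.getD 4 0) (s.getD 5 0)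
        = (PySem.List.pyRange (s.getD 1 0) (s.getD 3 0 + 1) 1).foldl (fun b i =>
            (PySem.List.pyRange (s.getD 2 0) (s.getD 4 0 + 1) 1).foldl
              (fun b j => pvCellAdd b i j (-(s.getD 5 0))) b) g := by
      unfold reloadPort
      rw [if_pos rfl]
    obtain ⟨hG, hP⟩ := foldl_rect n m (s.getD 2 0) (s.getD 4 0) (-(s.getD 5 0)) hc0 hdm
      (PySem.List.pyRange (s.getD 1 0) (s.getD 3 0 + 1) 1)
      (by intro y hy; have := PySem.List.mem_pyRange_one.1 hy; omega) g hg
    rw [hstep, hrel]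
    refine ⟨hG, ?_⟩
    intro i j hi hj
    rw [hP i j hi hj, count_pyRange_one]
    unfold sdelta
    rw [if_congr (and_iff_right (Or.inl h1)) rfl rfl, if_pos h1]
    split_ifs <;> first | (exfalso; omega) | (push_cast; ring) | ring
  · by_cases h2 : s.getD 0 0 = 2
    · obtain ⟨ha0, hab, hbn, hc0, hcd, hdm⟩ := hs (Or.inr h2)
      have hstep : pvStepA g s = reloadPort 2 g (s.getD 1 0) (s.getD 2 0) (s.getD 3 0) (s.getD 4 0) (s.getD 5 0) := by
        unfold pvStepA
        rw [e0, e1, e2, e3, e4, e5, if_neg h1, if_pos h2, h2]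
      have hrel : reloadPort 2 g (s.getD 1 0) (s.getD 2 0) (s.getD 3 0) (s.getD 4 0) (s.getD 5 0)
          = (PySem.List.pyRange (s.getD 1 0) (s.getD 3 0 + 1) 1).foldl (fun b i =>
              (PySem.List.pyRange (s.getD 2 0) (s.getD 4 0 + 1) 1).foldl
                (fun b j => pvCellAdd b i j (s.getD 5 0)) b) g := by
        unfold reloadPort
        rw [if_neg (by norm_num), if_pos rfl]
      obtain ⟨hG, hP⟩ := foldl_rect n m (s.getD 2 0) (s.getD 4 0) (s.getD 5 0) hc0 hdm
        (PySem.List.pyRange (s.getD 1 0) (s.getD 3 0 + 1) 1)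
        (by intro y hy; have := PySem.List.mem_pyRange_one.1 hy; omega) g hg
      rw [hstep, hrel]
      refine ⟨hG, ?_⟩
      intro i j hi hj
      rw [hP i j hi hj, count_pyRange_one]
      unfold sdelta
      rw [if_congr (and_iff_right (Or.inr h2)) rfl rfl, if_neg h1]
      split_ifs <;> first | (exfalso; omega) | (push_cast; ring) | ring
    · have hstep : pvStepA g s = g := by
        unfold pvStepA
        rw [e0, if_neg h1, if_neg h2]
      rw [hstep]
      refine ⟨hg, ?_⟩
      intro i j _ _
      unfold sdelta
      rw [if_neg (show ¬((s.getD 0 0 = 1 ∨ s.getD 0 0 = 2) ∧ s.getD 1 0 ≤ (i : Int) ∧ (i : Int) ≤ s.getD 3 0 ∧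
          s.getD 2 0 ≤ (j : Int) ∧ (j : Int) ≤ s.getD 4 0) from fun hc => hc.1.elim h1 h2), add_zero]

theorem foldA_effect (n m : Nat) (skill : List (List Int)) (hsk : SkOK n m skill)
    (g : List (List Int)) (hg : Grid n m g) :
    Grid n m (skill.foldl pvStepA g) ∧
    ∀ i j : Nat, i < n → j < m →
      gAt (skill.foldl pvStepA g) i j = gAt g i j + Fsk skill i j := by
  induction skill generalizing g with
  | nil =>
    refine ⟨hg, ?_⟩
    intro i j _ _
    simp [Fsk]
  | cons s sk ih =>
    obtain ⟨hG1, hP1⟩ := stepA_effect n m s (hsk s List.mem_cons_self) g hg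
    obtain ⟨hG, hP⟩ := ih (fun y hy h => hsk y (List.mem_cons_of_mem s hy) h) (pvStepA g s) hG1
    rw [List.foldl_cons]
    refine ⟨hG, ?_⟩
    intro i j hi hj
    rw [hP i j hi hj, hP1 i j hi hj]
    unfold Fsk
    rw [List.map_cons, List.sum_cons]
    ring

-- A-side: the counting loop ------------------------------------------------

theorem countRow_eq (row : List Int) (t : Int) :
    pvCountRow t row = t + ∑ j ∈ Finset.range row.length, (if 0 < row.getD j 0 then (1 : Int) else 0) := by
  induction row generalizing t with
  | nil => simp [pvCountRow]
  | cons x r ih =>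
    have hstep : pvCountRow t (x :: r) = pvCountRow (if x > 0 then t + 1 else t) r := by
      unfold pvCountRow
      rw [List.foldl_cons]
    rw [hstep, ih, List.length_cons, Finset.sum_range_succ']
    simp only [List.getD_cons_succ, List.getD_cons_zero]
    split_ifs <;> ring

theorem countFold_aux (g : List (List Int)) (n m : Nat) (t : Int) (hg : Grid n m g) :
    g.foldl pvCountRow t = t + specT n m (gAt g) := by
  induction g generalizing n t with
  | nil =>
    have hn : n = 0 := by
      have := hg.1
      simpa using this.symm
    subst hn
    simp [specT]
  | cons row rest ih =>
    have hn : n = rest.length + 1 := by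
      have := hg.1
      simpa using this.symm
    subst hn
    have hrowm : row.length = m := by
      have := hg.2 0 (by omega)
      simpa using this
    have hrest : Grid rest.length m rest := by
      refine ⟨rfl, ?_⟩
      intro i hi
      have := hg.2 (i + 1) (by omega)
      simpa using this
    rw [List.foldl_cons, ih rest.length (pvCountRow t row) hrest, countRow_eq]
    unfold specT
    rw [Finset.sum_range_succ']
    have hshift : ∀ i j : Nat, gAt (row :: rest) (i + 1) j = gAt rest i j := by
      intro i j
      unfold gAt
      rw [List.getD_cons_succ]
    have h0 : ∀ j : Nat, gAt (row :: rest) 0 j = row.getD j 0 := by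
      intro j
      unfold gAt
      rw [List.getD_cons_zero]
    simp only [hshift, h0, hrowm]
    ring

theorem countFold_eq (n m : Nat) (g : List (List Int)) (hg : Grid n m g) :
    g.foldl pvCountRow 0 = specT n m (gAt g) := by
  rw [countFold_aux g n m 0 hg]
  ring

-- B-side: the corner updates ----------------------------------------------

theorem cellAdd_effect (n m : Nat) (g : List (List Int)) (hg : Grid n m g) (a b d : Int)
    (ha : 0 ≤ a) (han : a < (n : Int)) (hb : 0 ≤ b) (hbm : b < (m : Int)) :
    Grid n m (pvCellAdd g a b d) ∧
    ∀ i j : Nat, gAt (pvCellAdd g a b d) i j = gAt g i j + d * ind a i * ind b j := by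
  have hca : a = ((a.toNat : Nat) : Int) := (Int.toNat_of_nonneg ha).symm
  have hcb : b = ((b.toNat : Nat) : Int) := (Int.toNat_of_nonneg hb).symm
  have heq : pvCellAdd g a b d
      = g.set a.toNat ((g.getD a.toNat []).set b.toNat ((g.getD a.toNat []).getD b.toNat 0 + d)) := by
    conv_lhs => rw [hca, hcb]
    exact pvCellAdd_nat g a.toNat b.toNat d
  have hia : a.toNat < n := by omega
  have hjb : b.toNat < m := by omega
  constructor
  · rw [heq]
    refine Grid_set n m g hg a.toNat _ ?_
    rw [List.length_set]
    exact hg.2 a.toNat hia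
  · intro i j
    rw [heq, gAt_set n m g hg a.toNat b.toNat hia hjb d i j]
    unfold ind
    split_ifs <;> first | (exfalso; omega) | (push_cast; ring) | ring

theorem bump4_effect (n m : Nat) (sx sy ex ey d : Int)
    (hb : 0 ≤ sx ∧ sx ≤ ex ∧ ex < (n : Int) ∧ 0 ≤ sy ∧ sy ≤ ey ∧ ey < (m : Int))
    (g : List (List Int)) (hg : Grid (n + 1) (m + 1) g) :
    Grid (n + 1) (m + 1) (pvBump4 g sx sy ex ey d) ∧
    ∀ i j : Nat, i < n + 1 → j < m + 1 →
      gAt (pvBump4 g sx sy ex ey d) i j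
        = gAt g i j + d * (ind sx i - ind (ex + 1) i) * (ind sy j - ind (ey + 1) j) := by
  obtain ⟨h1, h2, h3, h4, h5, h6⟩ := hb
  obtain ⟨g1G, g1P⟩ := cellAdd_effect (n + 1) (m + 1) g hg sx sy d
    (by omega) (by push_cast; omega) (by omega) (by push_cast; omega)
  obtain ⟨g2G, g2P⟩ := cellAdd_effect (n + 1) (m + 1) _ g1G sx (ey + 1) (-d)
    (by omega) (by push_cast; omega) (by omega) (by push_cast; omega)
  obtain ⟨g3G, g3P⟩ := cellAdd_effect (n + 1) (m + 1) _ g2G (ex + 1) sy (-d)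
    (by omega) (by push_cast; omega) (by omega) (by push_cast; omega)
  obtain ⟨g4G, g4P⟩ := cellAdd_effect (n + 1) (m + 1) _ g3G (ex + 1) (ey + 1) d
    (by omega) (by push_cast; omega) (by omega) (by push_cast; omega)
  have hBA : ∀ (g : List (List Int)) (a b d : Int), pvCellAddB g a b d = pvCellAdd g a b d :=
    fun _ _ _ _ => rfl
  unfold pvBump4
  simp only [hBA]
  refine ⟨g4G, ?_⟩
  intro i j _ _
  rw [g4P i j, g3P i j, g2P i j, g1P i j]
  ring

theorem stepB_effect (n m : Nat) (s : List Int)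
    (hs : (s.getD 0 0 = 1 ∨ s.getD 0 0 = 2) →
      0 ≤ s.getD 1 0 ∧ s.getD 1 0 ≤ s.getD 3 0 ∧ s.getD 3 0 < (n : Int) ∧
      0 ≤ s.getD 2 0 ∧ s.getD 2 0 ≤ s.getD 4 0 ∧ s.getD 4 0 < (m : Int))
    (g : List (List Int)) (hg : Grid (n + 1) (m + 1) g) :
    Grid (n + 1) (m + 1) (pvStepB g s) ∧
    ∀ i j : Nat, i < n + 1 → j < m + 1 →
      gAt (pvStepB g s) i j = gAt g i j + wmass s i j := by
  have e0 : PySem.List.pyGetD s 0 0 = s.getD 0 0 := by simpa using pvPyGetD_num s 0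
  have e1 : PySem.List.pyGetD s 1 0 = s.getD 1 0 := by simpa using pvPyGetD_num s 1
  have e2 : PySem.List.pyGetD s 2 0 = s.getD 2 0 := by simpa using pvPyGetD_num s 2
  have e3 : PySem.List.pyGetD s 3 0 = s.getD 3 0 := by simpa using pvPyGetD_num s 3
  have e4 : PySem.List.pyGetD s 4 0 = s.getD 4 0 := by simpa using pvPyGetD_num s 4
  have e5 : PySem.List.pyGetD s 5 0 = s.getD 5 0 := by simpa using pvPyGetD_num s 5
  by_cases h1 : s.getD 0 0 = 1
  · obtain ⟨ha0, hab, hbn, hc0, hcd, hdm⟩ := hs (Or.inl h1)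
    have hstep : pvStepB g s
        = pvBump4 g (s.getD 1 0) (s.getD 2 0) (s.getD 3 0) (s.getD 4 0) (-(s.getD 5 0)) := by
      unfold pvStepB pvBump4Guard
      rw [e0, e1, e2, e3, e4, e5, if_pos h1, if_neg (by omega)]
    obtain ⟨hG, hP⟩ := bump4_effect n m (s.getD 1 0) (s.getD 2 0) (s.getD 3 0) (s.getD 4 0)
      (-(s.getD 5 0)) ⟨ha0, hab, hbn, hc0, hcd, hdm⟩ g hg
    rw [hstep]
    refine ⟨hG, ?_⟩
    intro i j hi hj
    rw [hP i j hi hj]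
    unfold wmass
    rw [if_pos h1, if_pos (Or.inl h1)]
    ring
  · by_cases h2 : s.getD 0 0 = 2
    · obtain ⟨ha0, hab, hbn, hc0, hcd, hdm⟩ := hs (Or.inr h2)
      have hstep : pvStepB g s
          = pvBump4 g (s.getD 1 0) (s.getD 2 0) (s.getD 3 0) (s.getD 4 0) (s.getD 5 0) := by
        unfold pvStepB pvBump4Guard
        rw [e0, e1, e2, e3, e4, e5, if_neg h1, if_pos h2, if_neg (by omega)]
      obtain ⟨hG, hP⟩ := bump4_effect n m (s.getD 1 0) (s.getD 2 0) (s.getD 3 0) (s.getD 4 0)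
        (s.getD 5 0) ⟨ha0, hab, hbn, hc0, hcd, hdm⟩ g hg
      rw [hstep]
      refine ⟨hG, ?_⟩
      intro i j hi hj
      rw [hP i j hi hj]
      unfold wmass
      rw [if_neg h1, if_pos (Or.inr h2)]
      ring
    · have hstep : pvStepB g s = g := by
        unfold pvStepB
        rw [e0, if_neg h1, if_neg h2]
      rw [hstep]
      refine ⟨hg, ?_⟩
      intro i j _ _
      unfold wmass
      rw [if_neg h1, if_neg (show ¬(s.getD 0 0 = 1 ∨ s.getD 0 0 = 2) from fun hc => hc.elim h1 h2)]
      ring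

theorem foldB_effect (n m : Nat) (skill : List (List Int)) (hsk : SkOK n m skill)
    (g : List (List Int)) (hg : Grid (n + 1) (m + 1) g) :
    Grid (n + 1) (m + 1) (skill.foldl pvStepB g) ∧
    ∀ i j : Nat, i < n + 1 → j < m + 1 →
      gAt (skill.foldl pvStepB g) i j = gAt g i j + Wsk skill i j := by
  induction skill generalizing g with
  | nil =>
    refine ⟨hg, ?_⟩
    intro i j _ _
    simp [Wsk]
  | cons s sk ih =>
    obtain ⟨hG1, hP1⟩ := stepB_effect n m s (hsk s List.mem_cons_self) g hg
    obtain ⟨hG, hP⟩ := ih (fun y hy h => hsk y (List.mem_cons_of_mem s hy) h) (pvStepB g s) hG1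
    rw [List.foldl_cons]
    refine ⟨hG, ?_⟩
    intro i j hi hj
    rw [hP i j hi hj, hP1 i j hi hj]
    unfold Wsk
    rw [List.map_cons, List.sum_cons]
    ring

-- the prefix-sum identity --------------------------------------------------

theorem sum_ind (k : Nat) (c x : Int) :
    (∑ i ∈ Finset.range (k + 1), ind c i * x) = if 0 ≤ c ∧ c ≤ (k : Int) then x else 0 := by
  induction k with
  | zero =>
    rw [Finset.sum_range_one]
    unfold ind
    split_ifs <;> first | (exfalso; omega) | (push_cast; ring) | ring
  | succ k ih =>
    rw [Finset.sum_range_succ, ih]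
    unfold ind
    split_ifs <;> first | (exfalso; omega) | (push_cast; ring) | ring

theorem prefix_wmass (n m : Nat) (s : List Int)
    (hs : (s.getD 0 0 = 1 ∨ s.getD 0 0 = 2) →
      0 ≤ s.getD 1 0 ∧ s.getD 1 0 ≤ s.getD 3 0 ∧ s.getD 3 0 < (n : Int) ∧
      0 ≤ s.getD 2 0 ∧ s.getD 2 0 ≤ s.getD 4 0 ∧ s.getD 4 0 < (m : Int))
    (i j : Nat) (hi : i < n) (hj : j < m) :
    (∑ i' ∈ Finset.range (i + 1), ∑ j' ∈ Finset.range (j + 1), wmass s i' j') = sdelta s i j := by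
  by_cases hor : s.getD 0 0 = 1 ∨ s.getD 0 0 = 2
  · obtain ⟨ha0, hab, hbn, hc0, hcd, hdm⟩ := hs hor
    set e : Int := if s.getD 0 0 = 1 then -(s.getD 5 0) else s.getD 5 0 with he
    have hw : ∀ i' j' : Nat, wmass s i' j'
        = (ind (s.getD 1 0) i' * 1 - ind (s.getD 3 0 + 1) i' * 1) *
            (e * (ind (s.getD 2 0) j' * 1 - ind (s.getD 4 0 + 1) j' * 1)) := by
      intro i' j'
      unfold wmass
      rw [if_pos hor, ← he]
      ring
    have hrowsum : ∀ i' : Nat,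
        (∑ j' ∈ Finset.range (j + 1), wmass s i' j')
          = (ind (s.getD 1 0) i' * 1 - ind (s.getD 3 0 + 1) i' * 1) *
              (e * ((if 0 ≤ s.getD 2 0 ∧ s.getD 2 0 ≤ (j : Int) then (1:Int) else 0)
                - (if 0 ≤ s.getD 4 0 + 1 ∧ s.getD 4 0 + 1 ≤ (j : Int) then (1:Int) else 0))) := by
      intro i'
      rw [Finset.sum_congr rfl (fun j' _ => hw i' j'), ← Finset.mul_sum]
      congr 1
      rw [← Finset.mul_sum]
      congr 1
      rw [Finset.sum_sub_distrib, sum_ind j (s.getD 2 0) 1, sum_ind j (s.getD 4 0 + 1) 1]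
    rw [Finset.sum_congr rfl (fun i' _ => hrowsum i')]
    rw [← Finset.sum_mul, Finset.sum_sub_distrib, sum_ind i (s.getD 1 0) 1, sum_ind i (s.getD 3 0 + 1) 1]
    unfold sdelta
    rw [if_congr (and_iff_right hor) rfl rfl, ← he]
    split_ifs <;> first | (exfalso; omega) | (push_cast; ring) | ring
  · have hw : ∀ i' j' : Nat, wmass s i' j' = 0 := by
      intro i' j'
      unfold wmass
      rw [if_neg hor]
      ring
    have hd : sdelta s i j = 0 := by
      unfold sdelta
      rw [if_neg (fun hc => hor hc.1)]
    simp [hw, hd]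

theorem prefix_Wsk (n m : Nat) (skill : List (List Int)) (hsk : SkOK n m skill)
    (i j : Nat) (hi : i < n) (hj : j < m) :
    (∑ i' ∈ Finset.range (i + 1), ∑ j' ∈ Finset.range (j + 1), Wsk skill i' j') = Fsk skill i j := by
  induction skill with
  | nil => simp [Wsk, Fsk]
  | cons s sk ih =>
    have hWcons : ∀ i' j' : Nat, Wsk (s :: sk) i' j' = wmass s i' j' + Wsk sk i' j' := by
      intro i' j'
      unfold Wsk
      rw [List.map_cons, List.sum_cons]
    have hFcons : Fsk (s :: sk) i j = sdelta s i j + Fsk sk i j := by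
      unfold Fsk
      rw [List.map_cons, List.sum_cons]
    simp only [hWcons, hFcons, Finset.sum_add_distrib]
    rw [prefix_wmass n m s (hsk s List.mem_cons_self) i j hi hj,
      ih (fun y hy h => hsk y (List.mem_cons_of_mem s hy) h)]

-- B-side: the scan ---------------------------------------------------------

theorem pvScanInner_eq (diff board : List (List Int)) (i : Int)
    (st2 : (Int × Int) × List Int) (j : Int) :
    pvScanInner diff board i st2 j
      = ((if PySem.List.pyGetD (PySem.List.pyGetD board i []) j 0
              + (PySem.List.pyGetD st2.2 j 0
                + (st2.1.2 + PySem.List.pyGetD (PySem.List.pyGetD diff i []) j 0)) > 0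
            then st2.1.1 + 1 else st2.1.1,
          st2.1.2 + PySem.List.pyGetD (PySem.List.pyGetD diff i []) j 0),
         PySem.List.pySetD st2.2 j
           (PySem.List.pyGetD st2.2 j 0
             + (st2.1.2 + PySem.List.pyGetD (PySem.List.pyGetD diff i []) j 0))) := rfl

theorem scanInner_invariant (diff board : List (List Int)) (i : Nat) (m : Nat)
    (t : Int) (col0 : List Int) (hcol : col0.length = m) (k : Nat) (hk : k ≤ m) :
    ((PySem.List.pyRange 0 (k : Int) 1).foldl (pvScanInner diff board (i : Int)) ((t, 0), col0)).1.2
        = ∑ j' ∈ Finset.range k, gAt diff i j' ∧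
    ((PySem.List.pyRange 0 (k : Int) 1).foldl (pvScanInner diff board (i : Int)) ((t, 0), col0)).2.length = m ∧
    (∀ j : Nat, j < m →
      ((PySem.List.pyRange 0 (k : Int) 1).foldl (pvScanInner diff board (i : Int)) ((t, 0), col0)).2.getD j 0
        = col0.getD j 0 + (if j < k then ∑ j' ∈ Finset.range (j + 1), gAt diff i j' else 0)) ∧
    ((PySem.List.pyRange 0 (k : Int) 1).foldl (pvScanInner diff board (i : Int)) ((t, 0), col0)).1.1
        = t + ∑ j ∈ Finset.range k,
            (if 0 < gAt board i j + col0.getD j 0 + ∑ j' ∈ Finset.range (j + 1), gAt diff i j' then (1 : Int) else 0) := by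
  induction k with
  | zero =>
    rw [Nat.cast_zero, PySem.List.pyRange_one_eq_nil le_rfl]
    refine ⟨by simp, by simpa, ?_, by simp⟩
    intro j hj
    simp
  | succ k ih =>
    obtain ⟨ihacc, ihlen, ihcol, ihtot⟩ := ih (by omega)
    have hsplit : PySem.List.pyRange 0 ((k + 1 : Nat) : Int) 1
        = PySem.List.pyRange 0 ((k : Nat) : Int) 1 ++ [((k : Nat) : Int)] := by
      push_cast
      exact PySem.List.pyRange_one_succ_right (by omega)
    rw [hsplit, List.foldl_append, List.foldl_cons, List.foldl_nil]
    set st := (PySem.List.pyRange 0 ((k : Nat) : Int) 1).foldl (pvScanInner diff board (i : Int)) ((t, 0), col0) with hst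
    have hkm : k < m := by omega
    have hkcol : k < st.2.length := by rw [ihlen]; omega
    have hdk : PySem.List.pyGetD (PySem.List.pyGetD diff (i : Int) []) ((k : Nat) : Int) 0
        = gAt diff i k := by simp [gAt]
    have hbk : PySem.List.pyGetD (PySem.List.pyGetD board (i : Int) []) ((k : Nat) : Int) 0
        = gAt board i k := by simp [gAt]
    have hstk : PySem.List.pyGetD st.2 ((k : Nat) : Int) 0 = st.2.getD k 0 := by simp
    have hsetk : PySem.List.pySetD st.2 ((k : Nat) : Int)
          (PySem.List.pyGetD st.2 ((k : Nat) : Int) 0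
            + (st.1.2 + PySem.List.pyGetD (PySem.List.pyGetD diff (i : Int) []) ((k : Nat) : Int) 0))
        = st.2.set k (st.2.getD k 0 + (st.1.2 + gAt diff i k)) := by
      rw [hstk, hdk]
      simp
    have hcj : st.2.getD k 0 + (st.1.2 + gAt diff i k)
        = col0.getD k 0 + ∑ j' ∈ Finset.range (k + 1), gAt diff i j' := by
      rw [ihacc, ihcol k hkm, if_neg (by omega), Finset.sum_range_succ]
      ring
    rw [pvScanInner_eq]
    refine ⟨?_, ?_, ?_, ?_⟩
    · show st.1.2 + PySem.List.pyGetD (PySem.List.pyGetD diff (i : Int) []) ((k : Nat) : Int) 0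
        = ∑ j' ∈ Finset.range (k + 1), gAt diff i j'
      rw [hdk, ihacc, Finset.sum_range_succ]
    · show (PySem.List.pySetD st.2 _ _).length = m
      rw [PySem.List.length_pySetD]
      exact ihlen
    · intro j hj
      show (PySem.List.pySetD st.2 _ _).getD j 0 = _
      rw [hsetk, pvGetD_set st.2 k hkcol _ 0 j]
      by_cases hjk : j = k
      · subst hjk
        rw [if_pos rfl, hcj, if_pos (by omega)]
      · rw [if_neg hjk, ihcol j hj]
        by_cases hlt : j < k
        · rw [if_pos hlt, if_pos (by omega)]
        · rw [if_neg hlt, if_neg (by omega)]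
    · show (if PySem.List.pyGetD (PySem.List.pyGetD board (i : Int) []) ((k : Nat) : Int) 0
              + (PySem.List.pyGetD st.2 ((k : Nat) : Int) 0
                + (st.1.2 + PySem.List.pyGetD (PySem.List.pyGetD diff (i : Int) []) ((k : Nat) : Int) 0)) > 0
            then st.1.1 + 1 else st.1.1) = _
      rw [hbk, hstk, hdk, ihtot, Finset.sum_range_succ, hcj]
      by_cases hc : 0 < gAt board i k + col0.getD k 0 + ∑ j' ∈ Finset.range (k + 1), gAt diff i j'
      · rw [if_pos (by linarith), if_pos hc]
        ring
      · rw [if_neg (by intro h; apply hc; linarith), if_neg hc]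
        ring

theorem scanOuter_invariant (diff board : List (List Int)) (n m : Nat)
    (k : Nat) (hk : k ≤ n) :
    ((PySem.List.pyRange 0 (k : Int) 1).foldl (pvScanOuter diff board m)
        (0, List.replicate m (0 : Int))).2.length = m ∧
    (∀ j : Nat, j < m →
      ((PySem.List.pyRange 0 (k : Int) 1).foldl (pvScanOuter diff board m)
          (0, List.replicate m (0 : Int))).2.getD j 0
        = ∑ i' ∈ Finset.range k, ∑ j' ∈ Finset.range (j + 1), gAt diff i' j') ∧
    ((PySem.List.pyRange 0 (k : Int) 1).foldl (pvScanOuter diff board m)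
        (0, List.replicate m (0 : Int))).1
      = ∑ i ∈ Finset.range k, ∑ j ∈ Finset.range m,
          (if 0 < gAt board i j + ∑ i' ∈ Finset.range (i + 1), ∑ j' ∈ Finset.range (j + 1), gAt diff i' j'
           then (1 : Int) else 0) := by
  induction k with
  | zero =>
    rw [Nat.cast_zero, PySem.List.pyRange_one_eq_nil le_rfl]
    refine ⟨by simp, ?_, by simp⟩
    intro j hj
    rw [List.foldl_nil]
    simp [hj]
  | succ k ih =>
    obtain ⟨ihlen, ihcol, ihtot⟩ := ih (by omega)
    have hsplit : PySem.List.pyRange 0 ((k + 1 : Nat) : Int) 1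
        = PySem.List.pyRange 0 ((k : Nat) : Int) 1 ++ [((k : Nat) : Int)] := by
      push_cast
      exact PySem.List.pyRange_one_succ_right (by omega)
    rw [hsplit, List.foldl_append, List.foldl_cons, List.foldl_nil]
    set st := (PySem.List.pyRange 0 ((k : Nat) : Int) 1).foldl (pvScanOuter diff board m)
      (0, List.replicate m (0 : Int)) with hst
    obtain ⟨iacc, ilen, icol, itot⟩ :=
      scanInner_invariant diff board k m st.1 st.2 ihlen m le_rfl
    have hout : pvScanOuter diff board m st ((k : Nat) : Int)
        = (((PySem.List.pyRange 0 ((m : Nat) : Int) 1).foldl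
              (pvScanInner diff board ((k : Nat) : Int)) ((st.1, 0), st.2)).1.1,
           ((PySem.List.pyRange 0 ((m : Nat) : Int) 1).foldl
              (pvScanInner diff board ((k : Nat) : Int)) ((st.1, 0), st.2)).2) := rfl
    rw [hout]
    refine ⟨ilen, ?_, ?_⟩
    · intro j hj
      rw [icol j hj, if_pos hj, ihcol j hj]
      conv_rhs => rw [Finset.sum_range_succ]
    · rw [itot, ihtot]
      conv_rhs => rw [Finset.sum_range_succ]
      congr 1
      apply Finset.sum_congr rfl
      intro j hj
      have hjm : j < m := Finset.mem_range.1 hj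
      rw [ihcol j hjm]
      have harr : gAt board k j + (∑ i' ∈ Finset.range k, ∑ j' ∈ Finset.range (j + 1), gAt diff i' j')
            + ∑ j' ∈ Finset.range (j + 1), gAt diff k j'
          = gAt board k j + ∑ i' ∈ Finset.range (k + 1), ∑ j' ∈ Finset.range (j + 1), gAt diff i' j' := by
        rw [Finset.sum_range_succ (fun i' => ∑ j' ∈ Finset.range (j + 1), gAt diff i' j') k]
        ring
      rw [harr]

-- putting the two sides together -------------------------------------------

theorem solutionA_spec (board skill : List (List Int))
    (hrect : ∀ row ∈ board, row.length = (board.headD []).length)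
    (hsk : SkOK board.length (board.headD []).length skill) :
    solution board skill
      = specT board.length (board.headD []).length
          (fun i j => gAt board i j + Fsk skill i j) := by
  have hgb : Grid board.length (board.headD []).length board := by
    refine ⟨rfl, ?_⟩
    intro i hi
    have hmem : board.getD i [] ∈ board := by
      rw [pvGetD_eq_getElem' board i hi]
      exact List.getElem_mem hi
    exact hrect _ hmem
  obtain ⟨hG, hP⟩ := foldA_effect board.length (board.headD []).length skill hsk board hgb
  unfold solution
  rw [countFold_eq board.length (board.headD []).length _ hG]
  unfold specT
  apply Finset.sum_congr rfl
  intro i hi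
  apply Finset.sum_congr rfl
  intro j hj
  rw [hP i j (Finset.mem_range.1 hi) (Finset.mem_range.1 hj)]

theorem solutionB_spec (board skill : List (List Int))
    (hsk : SkOK board.length (board.headD []).length skill) :
    solution_alt board skill
      = specT board.length (board.headD []).length
          (fun i j => gAt board i j + Fsk skill i j) := by
  have hg0 : Grid (board.length + 1) ((board.headD []).length + 1)
      (List.replicate (board.length + 1) (List.replicate ((board.headD []).length + 1) (0 : Int))) := by
    refine ⟨by simp, ?_⟩
    intro i hi
    rw [pvGetD_replicate (board.length + 1) _ [] i, if_pos hi]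
    simp
  have hz : ∀ i j : Nat,
      gAt (List.replicate (board.length + 1) (List.replicate ((board.headD []).length + 1) (0 : Int))) i j = 0 := by
    intro i j
    unfold gAt
    rw [pvGetD_replicate (board.length + 1) _ [] i]
    by_cases h : i < board.length + 1
    · rw [if_pos h, pvGetD_replicate ((board.headD []).length + 1) _ 0 j]
      split <;> rfl
    · rw [if_neg h]
      simp
  obtain ⟨hG, hP⟩ := foldB_effect board.length (board.headD []).length skill hsk _ hg0
  set diff := skill.foldl pvStepB
    (List.replicate (board.length + 1) (List.replicate ((board.headD []).length + 1) (0 : Int))) with hdiff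
  have hW : ∀ i j : Nat, i < board.length + 1 → j < (board.headD []).length + 1 →
      gAt diff i j = Wsk skill i j := by
    intro i j hi hj
    rw [hdiff, hP i j hi hj, hz i j]
    ring
  obtain ⟨olen, ocol, otot⟩ :=
    scanOuter_invariant diff board board.length (board.headD []).length board.length le_rfl
  have hrfl : solution_alt board skill
      = ((PySem.List.pyRange 0 (board.length : Int) 1).foldl
          (pvScanOuter diff board (board.headD []).length)
          (0, List.replicate (board.headD []).length (0 : Int))).1 := rfl
  rw [hrfl, otot]
  unfold specT
  apply Finset.sum_congr rfl
  intro i hi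
  apply Finset.sum_congr rfl
  intro j hj
  have him : i < board.length := Finset.mem_range.1 hi
  have hjm : j < (board.headD []).length := Finset.mem_range.1 hj
  have hpre : (∑ i' ∈ Finset.range (i + 1), ∑ j' ∈ Finset.range (j + 1), gAt diff i' j')
      = Fsk skill i j := by
    rw [Finset.sum_congr rfl (fun i' hi' => Finset.sum_congr rfl (fun j' hj' =>
      hW i' j' (by have := Finset.mem_range.1 hi'; omega) (by have := Finset.mem_range.1 hj'; omega)))]
    exact prefix_Wsk board.length (board.headD []).length skill hsk i j him hjm
  rw [hpre]

-- ===== VERDICT (by name: the statement is the Claim_ definition above) =====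
theorem solution_spec : Claim_equal_solution := by
  intro board skill _hdom hpre
  have hsk : SkOK board.length (board.headD []).length skill := by
    intro s hs h12
    exact ((hpre.2 s hs).2 h12).2
  unfold Spec_solution
  rw [solutionA_spec board skill hpre.1 hsk, solutionB_spec board skill hsk]
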